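-- pv_equiv track=rewrite | github.com/Mr-Harsh-Dixit/Project_Euler_Solutions | Python/Problem_105.py | rule1_disjoint
-- ===== SOURCE A (Python) =====
-- def rule1_disjoint(a):
--     n = len(a)
--     seen = {}  # sum -> bitmask
--     for mask in range(1, 1 << n):
--         s = 0
--         m = mask
--         i = 0
--         while m:
--             if m & 1:
--                 s += a[i]
--             i += 1
--             m >>= 1
--
--         prev = seen.get(s)
--         if prev is None:
--             seen[s] = mask
--         else:
--             if (prev & mask) == 0:  # disjoint subsets with equal sum
--                 return False
--     return True
-- ===== SOURCE B (Python) =====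
-- def rule1_disjoint(a):
--     # Subset sums by doubling DP: each new element extends the table in O(1) per mask,
--     # masks still appear in increasing numeric order, so 'first' maps each sum to the
--     # smallest mask having it; a later equal-sum mask disjoint from it => False.
--     sums = [0]
--     first = {}
--     for x in a:
--         base = len(sums)
--         sums += [s + x for s in sums]
--         for mask in range(base, 2 * base):
--             f = first.get(sums[mask])
--             if f is None:
--                 first[sums[mask]] = mask
--             elif f & mask == 0:
--                 return False
--     return True
-- ===== Notes on version B (the rewrite author's own statement) =====
-- stated objective: faster
-- what changed: B replaces A's per-mask O(n) bit-scan recomputation of subset sums with a doubling DP that extends the sum table once per element, scanning each new batch of masks against the sum->first-mask dict with the same early return.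
import Mathlib
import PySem

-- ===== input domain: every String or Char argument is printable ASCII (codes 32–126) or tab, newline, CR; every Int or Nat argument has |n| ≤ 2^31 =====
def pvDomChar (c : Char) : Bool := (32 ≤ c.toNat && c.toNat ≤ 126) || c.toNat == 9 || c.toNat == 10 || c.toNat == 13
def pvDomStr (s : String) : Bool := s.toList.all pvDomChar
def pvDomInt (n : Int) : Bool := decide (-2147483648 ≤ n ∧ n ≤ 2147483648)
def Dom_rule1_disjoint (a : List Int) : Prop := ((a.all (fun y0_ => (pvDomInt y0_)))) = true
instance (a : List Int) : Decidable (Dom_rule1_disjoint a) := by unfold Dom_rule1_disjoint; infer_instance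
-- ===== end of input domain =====

-- B replaces A's per-mask bit-scan subset sums by a doubling DP extended once per element,
-- scanning each new batch of masks against a sum -> first-mask dict (objective: faster).

-- ===== PORT A =====
-- A's inner while loop: accumulator s, remaining bits m, index i.  Masks are < 2^len(a),
-- so every index i read at a set bit is < len(a): a[i] never raises; ported as a.getD i 0.
def pvSumGo (a : List Int) (s : Int) (m i : Nat) : Int :=
  if m = 0 then s
  else pvSumGo a (if m &&& 1 = 1 then s + a.getD i 0 else s) (m >>> 1) (i + 1)
termination_by m
decreasing_by simp only [Nat.shiftRight_one]; omega

-- A's for-loop over masks with the seen dict (sum -> first mask) and early return False.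
def pvALoop (a : List Int) : List Nat → PySem.Dict Int Nat → Bool
  | [], _ => true
  | mask :: rest, seen =>
    let s := pvSumGo a 0 mask 0
    match seen.get? s with
    | none => pvALoop a rest (seen.insert s mask)
    | some prev => if prev &&& mask = 0 then false else pvALoop a rest seen

-- masks = range(1, 1 << n); masks are nonnegative ints, represented as Nat
def rule1_disjoint (a : List Int) : Bool :=
  pvALoop a (List.range' 1 (2 ^ a.length - 1)) PySem.Dict.empty

-- ===== PORT B =====
-- inner for-loop over the new batch of masks range(base, 2*base): dict lookup/insert and
-- the early `return False`, signalled by `none`; sums[mask] never raises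
-- (mask < len(sums)), ported as sums.getD mask 0.
def pvBInner (sums : List Int) : List Nat → PySem.Dict Int Nat → Option (PySem.Dict Int Nat)
  | [], first => some first
  | mask :: rest, first =>
    match first.get? (sums.getD mask 0) with
    | none => pvBInner sums rest (first.insert (sums.getD mask 0) mask)
    | some f => if f &&& mask = 0 then none else pvBInner sums rest first

-- outer for-loop over the elements: double the subset-sum table, then scan the new masks
def pvBOuter (sums : List Int) (first : PySem.Dict Int Nat) : List Int → Bool
  | [] => true
  | x :: xs =>
    let sums2 := sums ++ sums.map (fun s => s + x)
    match pvBInner sums2 (List.range' sums.length sums.length) first with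
    | none => false
    | some first2 => pvBOuter sums2 first2 xs

def rule1_disjoint_alt (a : List Int) : Bool :=
  pvBOuter [0] PySem.Dict.empty a

-- ===== PRECONDITION & SPEC =====
def Spec_rule1_disjoint (a : List Int) (out : Bool) : Prop := out = rule1_disjoint_alt a
instance (a : List Int) (out : Bool) : Decidable (Spec_rule1_disjoint a out) := by unfold Spec_rule1_disjoint; infer_instance

-- ===== CLAIM (what is proved, stated in full; the proofs are below) =====
def Claim_equal_rule1_disjoint : Prop := ∀ (a : List Int), Dom_rule1_disjoint a → Spec_rule1_disjoint a (rule1_disjoint a)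

-- ===== LEMMAS AND PROOFS =====

-- the subset-sum table B has built after processing a prefix of a, as one expression
def pvBSums (a : List Int) : List Int :=
  a.foldl (fun sums x => sums ++ sums.map (fun s => s + x)) [0]

theorem pvSumGo_zero (a : List Int) (s : Int) (i : Nat) : pvSumGo a s 0 i = s := by
  rw [pvSumGo]
  simp

theorem pvSumGo_pos (a : List Int) (s : Int) (m i : Nat) (h : m ≠ 0) :
    pvSumGo a s m i
      = pvSumGo a (if m &&& 1 = 1 then s + a.getD i 0 else s) (m >>> 1) (i + 1) := by
  rw [pvSumGo]; simp [h]

theorem pvSumGo_append (a b : List Int) :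
    ∀ (k m i : Nat) (s : Int), m < 2 ^ k → i + k ≤ a.length →
      pvSumGo (a ++ b) s m i = pvSumGo a s m i := by
  intro k
  induction k with
  | zero =>
    intro m i s hm _
    interval_cases m
    rw [pvSumGo_zero, pvSumGo_zero]
  | succ k ih =>
    intro m i s hm hi
    by_cases h0 : m = 0
    · subst h0; rw [pvSumGo_zero, pvSumGo_zero]
    · rw [pvSumGo_pos _ _ _ _ h0, pvSumGo_pos _ _ _ _ h0]
      have hget : (a ++ b).getD i 0 = a.getD i 0 := by
        have hia : i < a.length := by omega
        simp [List.getD, List.getElem?_append_left hia]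
      rw [hget]
      have hlt : m >>> 1 < 2 ^ k := by
        simp only [Nat.shiftRight_one]
        have := Nat.pow_succ 2 k
        omega
      exact ih (m >>> 1) (i+1) _ hlt (by omega)

theorem pvSumGo_add_pow (a : List Int) :
    ∀ (k m i : Nat) (s : Int), m < 2 ^ k →
      pvSumGo a s (m + 2 ^ k) i = pvSumGo a s m i + a.getD (i + k) 0 := by
  intro k
  induction k with
  | zero =>
    intro m i s hm
    interval_cases m
    rw [pvSumGo_pos _ _ _ _ (by norm_num)]
    simp [pvSumGo_zero]
  | succ k ih =>
    intro m i s hm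
    have hne : m + 2 ^ (k+1) ≠ 0 := by positivity
    rw [pvSumGo_pos _ _ _ _ hne]
    have hp : 2 ^ (k+1) = 2 ^ k * 2 := Nat.pow_succ 2 k
    have hand : (m + 2 ^ (k+1)) &&& 1 = m &&& 1 := by
      simp only [Nat.and_one_is_mod]; omega
    have hshift : (m + 2 ^ (k+1)) >>> 1 = m >>> 1 + 2 ^ k := by
      simp only [Nat.shiftRight_one]; omega
    rw [hand, hshift]
    have hlt : m >>> 1 < 2 ^ k := by simp only [Nat.shiftRight_one]; omega
    rw [ih (m >>> 1) (i+1) _ hlt]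
    have hidx : i + 1 + k = i + (k+1) := by omega
    rw [hidx]
    by_cases h0 : m = 0
    · subst h0
      simp [pvSumGo_zero]
    · rw [pvSumGo_pos _ _ _ _ h0]

theorem pvBSums_concat (a : List Int) (x : Int) :
    pvBSums (a ++ [x]) = pvBSums a ++ (pvBSums a).map (fun s => s + x) := by
  unfold pvBSums
  rw [List.foldl_append]
  rfl

theorem pvBSums_length (a : List Int) : (pvBSums a).length = 2 ^ a.length := by
  induction a using List.reverseRecOn with
  | nil => rfl
  | append_singleton as x ih =>
    rw [pvBSums_concat]
    simp [ih, List.length_append]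
    ring

theorem pvBSums_getD (a : List Int) :
    ∀ m : Nat, m < 2 ^ a.length → (pvBSums a).getD m 0 = pvSumGo a 0 m 0 := by
  induction a using List.reverseRecOn with
  | nil =>
    intro m hm
    simp at hm
    have h0 : m = 0 := by omega
    subst h0
    rw [pvSumGo_zero]; rfl
  | append_singleton as x ih =>
    intro m hm
    rw [pvBSums_concat]
    have hlen : (pvBSums as).length = 2 ^ as.length := pvBSums_length as
    by_cases hsm : m < 2 ^ as.length
    · have hml : m < (pvBSums as).length := by omega
      rw [List.getD_eq_getElem?_getD, List.getElem?_append_left hml,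
          ← List.getD_eq_getElem?_getD, ih m hsm]
      exact (pvSumGo_append as [x] as.length m 0 0 hsm (by omega)).symm
    · have hge : (pvBSums as).length ≤ m := by omega
      have hm2 : m < 2 ^ (as.length + 1) := by simpa using hm
      have hr : m - 2 ^ as.length < 2 ^ as.length := by
        have := Nat.pow_succ 2 as.length; omega
      rw [List.getD_eq_getElem?_getD, List.getElem?_append_right hge,
          List.getElem?_map]
      have hrl : m - (pvBSums as).length < (pvBSums as).length := by omega
      rw [List.getElem?_eq_getElem hrl]
      simp only [Option.map_some, Option.getD_some]
      have heq : m = (m - 2 ^ as.length) + 2 ^ as.length := by omega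
      have hgx : (as ++ [x]).getD (0 + as.length) 0 = x := by
        simp [List.getD_eq_getElem?_getD]
      have hrhs : pvSumGo (as ++ [x]) 0 m 0
          = pvSumGo as 0 (m - 2 ^ as.length) 0 + x := by
        conv_lhs => rw [heq]
        rw [pvSumGo_add_pow (as ++ [x]) as.length (m - 2 ^ as.length) 0 0 hr]
        rw [pvSumGo_append as [x] as.length (m - 2 ^ as.length) 0 0 hr (by omega), hgx]
      have hgv : (pvBSums as)[m - (pvBSums as).length] = pvSumGo as 0 (m - 2 ^ as.length) 0 := by
        rw [← List.getD_eq_getElem (pvBSums as) 0 hrl]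
        rw [hlen]
        exact ih _ hr
      rw [hrhs, hgv]

-- A's loop body as a resumable scan: `none` = A returned False during these masks,
-- `some d` = A survived them with dict d
def pvScan (a : List Int) : List Nat → PySem.Dict Int Nat → Option (PySem.Dict Int Nat)
  | [], d => some d
  | mask :: rest, d =>
    match d.get? (pvSumGo a 0 mask 0) with
    | none => pvScan a rest (d.insert (pvSumGo a 0 mask 0) mask)
    | some f => if f &&& mask = 0 then none else pvScan a rest d

theorem pvALoop_split (a : List Int) :
    ∀ (M1 M2 : List Nat) (d : PySem.Dict Int Nat),
      pvALoop a (M1 ++ M2) d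
        = (match pvScan a M1 d with
           | none => false
           | some d2 => pvALoop a M2 d2) := by
  intro M1
  induction M1 with
  | nil => intro M2 d; rfl
  | cons mask rest ih =>
    intro M2 d
    rw [List.cons_append]
    simp only [pvALoop, pvScan]
    cases d.get? (pvSumGo a 0 mask 0) with
    | none => exact ih M2 _
    | some f =>
      by_cases hfm : f &&& mask = 0
      · simp [hfm]
      · simp only [if_neg hfm]
        exact ih M2 d

-- B's inner scan is A's scan whenever the table gives A's sums on the scanned masks
theorem pvBInner_eq_scan (a : List Int) (sums : List Int) :
    ∀ (masks : List Nat) (first : PySem.Dict Int Nat),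
      (∀ m ∈ masks, sums.getD m 0 = pvSumGo a 0 m 0) →
      pvBInner sums masks first = pvScan a masks first := by
  intro masks
  induction masks with
  | nil => intro first _; rfl
  | cons mask rest ih =>
    intro first h
    simp only [pvBInner, pvScan, h mask (by simp)]
    cases first.get? (pvSumGo a 0 mask 0) with
    | none => exact ih _ (fun m hm => h m (by simp [hm]))
    | some f =>
      by_cases hfm : f &&& mask = 0
      · simp [hfm]
      · simp only [if_neg hfm]
        exact ih first (fun m hm => h m (by simp [hm]))

-- main induction: after processing prefix p, B's state is (pvBSums p, d) and the masks
-- A still has to scan are range' 2^|p| (2^|a| - 2^|p|)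
theorem pvOuter_eq (a : List Int) :
    ∀ (xs p : List Int) (d : PySem.Dict Int Nat), a = p ++ xs →
      pvBOuter (pvBSums p) d xs
        = pvALoop a (List.range' (2 ^ p.length) (2 ^ a.length - 2 ^ p.length)) d := by
  intro xs
  induction xs with
  | nil =>
    intro p d hpa
    have hn : a.length = p.length := by rw [hpa]; simp
    rw [hn, Nat.sub_self]
    rfl
  | cons x xs ih =>
    intro p d hpa
    have hlen : (pvBSums p).length = 2 ^ p.length := pvBSums_length p
    have hcat : pvBSums p ++ (pvBSums p).map (fun s => s + x) = pvBSums (p ++ [x]) :=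
      (pvBSums_concat p x).symm
    have hgoal : ∀ m ∈ List.range' (2 ^ p.length) (2 ^ p.length),
        (pvBSums (p ++ [x])).getD m 0 = pvSumGo a 0 m 0 := by
      intro m hm
      have hml : m < 2 ^ (p ++ [x]).length := by
        have hux : (p ++ [x]).length = p.length + 1 := by simp
        rw [hux]
        obtain ⟨i, hi, rfl⟩ := List.mem_range'.mp hm
        have h2p : 2 ^ (p.length + 1) = 2 ^ p.length * 2 := Nat.pow_succ 2 p.length
        omega
      rw [pvBSums_getD (p ++ [x]) m hml]
      have ha : a = (p ++ [x]) ++ xs := by rw [hpa]; simp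
      rw [ha]
      exact (pvSumGo_append (p ++ [x]) xs (p ++ [x]).length m 0 0 hml (by simp)).symm
    have hsplit : List.range' (2 ^ p.length) (2 ^ a.length - 2 ^ p.length)
        = List.range' (2 ^ p.length) (2 ^ p.length)
          ++ List.range' (2 ^ p.length + 2 ^ p.length) (2 ^ a.length - 2 ^ (p.length + 1)) := by
      have hle : 2 ^ (p.length + 1) ≤ 2 ^ a.length := by
        apply Nat.pow_le_pow_right (by norm_num)
        rw [hpa]
        simp only [List.length_append, List.length_cons]
        omega
      have h2p : 2 ^ (p.length + 1) = 2 ^ p.length * 2 := Nat.pow_succ 2 p.length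
      have hsum : 2 ^ a.length - 2 ^ p.length
          = 2 ^ p.length + (2 ^ a.length - 2 ^ (p.length + 1)) := by omega
      have hone : (2:Nat) ^ p.length + 2 ^ p.length = 2 ^ p.length + 1 * 2 ^ p.length := by ring
      rw [hsum, hone, List.range'_append]
    show (match pvBInner (pvBSums p ++ (pvBSums p).map (fun s => s + x))
            (List.range' (pvBSums p).length (pvBSums p).length) d with
          | none => false
          | some first2 => pvBOuter (pvBSums p ++ (pvBSums p).map (fun s => s + x)) first2 xs) = _
    rw [hcat, hlen, hsplit, pvALoop_split,
        pvBInner_eq_scan a (pvBSums (p ++ [x])) (List.range' (2 ^ p.length) (2 ^ p.length)) d hgoal]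
    have hpp : 2 ^ p.length + 2 ^ p.length = 2 ^ (p.length + 1) := by
      have := Nat.pow_succ 2 p.length; omega
    cases pvScan a (List.range' (2 ^ p.length) (2 ^ p.length)) d with
    | none => rfl
    | some d2 =>
      show pvBOuter (pvBSums (p ++ [x])) d2 xs
          = pvALoop a (List.range' (2 ^ p.length + 2 ^ p.length)
              (2 ^ a.length - 2 ^ (p.length + 1))) d2
      have hx : a = (p ++ [x]) ++ xs := by rw [hpa]; simp
      have h2 := ih (p ++ [x]) d2 hx
      simp only [List.length_append, List.length_cons, List.length_nil, Nat.zero_add] at h2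
      rw [hpp]
      exact h2

-- ===== VERDICT (by name: the statement is the Claim_ definition above) =====
theorem rule1_disjoint_spec : Claim_equal_rule1_disjoint := by
  intro a _
  unfold Spec_rule1_disjoint rule1_disjoint rule1_disjoint_alt
  have h0 : ([0] : List Int) = pvBSums [] := rfl
  rw [h0, pvOuter_eq a a [] PySem.Dict.empty (by simp)]
  norm_num
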